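-- pv_equiv track=rewrite | github.com/uRo3YA/TIL | 프로그래머스/기능개발.py | solution
-- ===== SOURCE A (Python) =====
-- def solution(progresses, speeds):
--     answer=[]
--     for i in range(len(progresses)):
--         p=progresses[i]
--         s=speeds[i]
--         d=0
--         d_cnt=0
--         while True:
--             if p+(s*d) >= 100:
--                 break
--             d+=1
--             d_cnt+=1
--         answer.append(d_cnt)
--     return answer
-- ===== SOURCE B (Python) =====
-- def solution(progresses, speeds):
--     return [0 if p >= 100 else -((p - 100) // s) for p, s in zip(progresses, speeds)]
-- ===== Notes on version B (the rewrite author's own statement) =====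
-- stated objective: simpler
-- what changed: Replaces the per-task unit-step while loop with a closed-form ceiling division -((p-100)//s), clamped to 0 for p>=100, in a single zip comprehension.
import Mathlib
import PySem

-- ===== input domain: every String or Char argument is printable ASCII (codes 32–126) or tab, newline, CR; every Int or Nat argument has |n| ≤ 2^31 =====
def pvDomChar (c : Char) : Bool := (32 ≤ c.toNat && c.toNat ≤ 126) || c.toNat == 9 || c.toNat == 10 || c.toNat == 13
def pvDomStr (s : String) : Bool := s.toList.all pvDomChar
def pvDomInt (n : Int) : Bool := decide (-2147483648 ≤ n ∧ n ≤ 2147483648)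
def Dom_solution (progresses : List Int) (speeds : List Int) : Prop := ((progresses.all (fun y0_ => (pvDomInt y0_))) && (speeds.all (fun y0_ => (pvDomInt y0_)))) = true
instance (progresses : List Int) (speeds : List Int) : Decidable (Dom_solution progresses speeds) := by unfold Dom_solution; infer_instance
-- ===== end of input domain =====

-- B computes each task's day count with a closed-form ceiling division instead of A's unit-step while loop.


-- ===== PORT A =====
-- The 'while True' loop: fuel only makes the recursion total (the fuel chosen in
-- `solution` suffices whenever the Python loop terminates, i.e. on Pre_); each step is
-- exactly the loop body (break test, then d += 1; d_cnt += 1).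
def solutionLoop (p s : Int) : Nat → Int → Int → Int
  | 0, _, dcnt => dcnt
  | fuel + 1, d, dcnt =>
      if p + s * d ≥ 100 then dcnt else solutionLoop p s fuel (d + 1) (dcnt + 1)

def solution (progresses : List Int) (speeds : List Int) : List Int :=
  (PySem.List.pyRange 0 progresses.length 1).foldl
    (fun answer i =>
      match PySem.List.pyGet? progresses i, PySem.List.pyGet? speeds i with
      | some p, some s => answer ++ [solutionLoop p s ((100 - p).toNat + 1) 0 0]
      | _, _ => answer)   -- speeds[i] raises IndexError in Python: excluded by Pre_
    []

-- ===== PORT B =====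
def solution_alt (progresses : List Int) (speeds : List Int) : List Int :=
  (progresses.zip speeds).map
    (fun pr => if pr.1 ≥ 100 then 0 else -(PySem.Int.floordiv (pr.1 - 100) pr.2))

-- ===== PRECONDITION & SPEC =====
-- Pre_ excludes only inputs on which A never returns: speeds shorter than progresses
-- (IndexError) and a pair with p < 100 and s ≤ 0 (the while loop never terminates).
def Pre_solution (progresses : List Int) (speeds : List Int) : Prop :=
  progresses.length ≤ speeds.length ∧
  ∀ pr ∈ progresses.zip speeds, 100 ≤ pr.1 ∨ 1 ≤ pr.2

instance (progresses : List Int) (speeds : List Int) : Decidable (Pre_solution progresses speeds) := by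
  unfold Pre_solution; infer_instance

def pvWitness_solution : List Int × List Int := ([93, 30, 55], [1, 30, 5])

def Spec_solution (progresses : List Int) (speeds : List Int) (out : List Int) : Prop := out = solution_alt progresses speeds
instance (progresses : List Int) (speeds : List Int) (out : List Int) : Decidable (Spec_solution progresses speeds out) := by unfold Spec_solution; infer_instance

-- ===== CLAIM (what is proved, stated in full; the proofs are below) =====
def Claim_equal_solution : Prop := ∀ (progresses : List Int) (speeds : List Int), Dom_solution progresses speeds → Pre_solution progresses speeds → Spec_solution progresses speeds (solution progresses speeds)

-- ===== LEMMAS AND PROOFS =====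

-- The while loop from state (d, dcnt), given enough fuel and s ≥ 1, adds exactly
-- the ceiling of (100 - p - s*d)/s (clamped at 0) to dcnt.
theorem solutionLoop_eq (p s : Int) (hs : 1 ≤ s) :
    ∀ (fuel : Nat) (d dcnt : Int),
      -((p + s * d - 100) / s) ≤ (fuel : Int) →
      solutionLoop p s fuel d dcnt = dcnt + max 0 (-((p + s * d - 100) / s)) := by
  intro fuel
  induction fuel with
  | zero =>
      intro d dcnt hfuel
      simp only [solutionLoop]
      omega
  | succ n ih =>
      intro d dcnt hfuel
      simp only [solutionLoop]
      by_cases hbrk : p + s * d ≥ 100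
      · have hq : 0 ≤ (p + s * d - 100) / s :=
          Int.ediv_nonneg (by omega) (by omega)
        simp only [if_pos hbrk]
        omega
      · have hq : (p + s * d - 100) / s < 0 :=
          Int.ediv_neg_of_neg_of_pos (by omega) (by omega)
        have hstep : (p + s * (d + 1) - 100) / s = (p + s * d - 100) / s + 1 := by
          have := Int.add_mul_ediv_right (p + s * d - 100) 1 (show s ≠ 0 by omega)
          calc (p + s * (d + 1) - 100) / s = (p + s * d - 100 + 1 * s) / s := by ring_nf
            _ = (p + s * d - 100) / s + 1 := this
        simp only [if_neg hbrk]
        rw [ih (d + 1) (dcnt + 1) (by omega)]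
        rw [hstep]
        omega

-- One task: the loop (with the fuel `solution` supplies) equals B's closed form.
theorem solutionElem_eq (p s : Int) (h : 100 ≤ p ∨ 1 ≤ s) :
    solutionLoop p s ((100 - p).toNat + 1) 0 0 =
      if p ≥ 100 then 0 else -(PySem.Int.floordiv (p - 100) s) := by
  by_cases hp : 100 ≤ p
  · simp only [solutionLoop]
    rw [if_pos (show p + s * 0 ≥ 100 by omega), if_pos (show p ≥ 100 from hp)]
  · have hs : 1 ≤ s := by omega
    rw [if_neg (by omega)]
    rw [PySem.Int.floordiv_eq_ediv_of_pos (by omega)]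
    have hF : ((100 - p).toNat + 1 : Int) ≤ ((100 - p).toNat + 1 : Int) * s := by
      exact le_mul_of_one_le_right (by positivity) hs
    have hle : -(((100 - p).toNat : Int) + 1) ≤ (p - 100) / s := by
      rw [Int.le_ediv_iff_mul_le (by omega)]
      rw [neg_mul]
      have h1 : -((((100 - p).toNat : Int) + 1) * s) ≤ -(((100 - p).toNat : Int) + 1) := by
        linarith
      have h2 : -(((100 - p).toNat : Int) + 1) ≤ p - 100 := by
        have : ((100 - p).toNat : Int) = 100 - p := by omega
        omega
      linarith
    have := solutionLoop_eq p s hs ((100 - p).toNat + 1) 0 0 (by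
      have : p + s * 0 - 100 = p - 100 := by ring
      rw [this]
      push_cast
      omega)
    rw [this]
    have hq : (p + s * 0 - 100) / s < 0 := Int.ediv_neg_of_neg_of_pos (by omega) (by omega)
    have he : p + s * 0 - 100 = p - 100 := by ring
    rw [he] at this hq ⊢
    omega

-- The whole fold, rewritten as a map over the index range (valid under Pre_).
theorem solution_foldl_eq_map (progresses speeds : List Int)
    (hlen : progresses.length ≤ speeds.length) :
    solution progresses speeds =
      (PySem.List.pyRange 0 progresses.length 1).map
        (fun i => solutionLoop ((PySem.List.pyGet? progresses i).getD 0)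
            ((PySem.List.pyGet? speeds i).getD 0)
            ((100 - (PySem.List.pyGet? progresses i).getD 0).toNat + 1) 0 0) := by
  unfold solution
  rw [PySem.List.foldl_congr_mem' (g := fun answer i =>
        answer ++ [solutionLoop ((PySem.List.pyGet? progresses i).getD 0)
            ((PySem.List.pyGet? speeds i).getD 0)
            ((100 - (PySem.List.pyGet? progresses i).getD 0).toNat + 1) 0 0])]
  · rw [PySem.List.foldl_append_singleton_eq_map]
    simp
  · intro i hi acc
    rw [PySem.List.mem_pyRange_one] at hi
    have hp : PySem.List.pyGet? progresses i = some (progresses[i.toNat]'(by omega)) := by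
      rw [PySem.List.pyGet?_of_nonneg _ hi.1]
      exact List.getElem?_eq_getElem (by omega)
    have hsv : PySem.List.pyGet? speeds i = some (speeds[i.toNat]'(by omega)) := by
      rw [PySem.List.pyGet?_of_nonneg _ hi.1]
      exact List.getElem?_eq_getElem (by omega)
    rw [hp, hsv]
    rfl

theorem solution_eq_alt (progresses speeds : List Int)
    (hpre : Pre_solution progresses speeds) :
    solution progresses speeds = solution_alt progresses speeds := by
  obtain ⟨hlen, hpair⟩ := hpre
  rw [solution_foldl_eq_map progresses speeds hlen]
  unfold solution_alt
  apply List.ext_getElem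
  · rw [List.length_map, List.length_map, PySem.List.length_pyRange_one, List.length_zip]
    omega
  · intro k h1 h2
    have hk : k < progresses.length := by
      simpa [PySem.List.length_pyRange_one] using h1
    have hk2 : k < speeds.length := by omega
    simp only [List.getElem_map, PySem.List.getElem_pyRange_one, List.getElem_zip]
    have hi : (0 : Int) + (k : Int) = (k : Int) := by omega
    rw [hi]
    have hp : PySem.List.pyGet? progresses (k : Int) = some (progresses[k]) := by
      rw [PySem.List.pyGet?_natCast]
      exact List.getElem?_eq_getElem hk
    have hsv : PySem.List.pyGet? speeds (k : Int) = some (speeds[k]) := by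
      rw [PySem.List.pyGet?_natCast]
      exact List.getElem?_eq_getElem hk2
    rw [hp, hsv]
    simp only [Option.getD_some]
    have hkz : k < (progresses.zip speeds).length := by
      rw [List.length_zip]; omega
    have hmem := List.getElem_mem hkz
    rw [List.getElem_zip] at hmem
    exact solutionElem_eq _ _ (by simpa using hpair _ hmem)

-- ===== VERDICT (by name: the statement is the Claim_ definition above) =====
theorem solution_spec : Claim_equal_solution := by
  intro progresses speeds _ hpre
  unfold Spec_solution
  exact solution_eq_alt progresses speeds hpre
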